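-- pv_equiv track=rewrite | github.com/Valenciano118/prog1 | Prac3/ej07.py | contar_divisores
-- ===== SOURCE A (Python) =====
-- def contar_divisores(n):
--     máximo_divisores=0
--     n_maximo=0
--     for x in range(1,n+1):
--         contador_divisores=0
--         for i in range (1,x+1):
--             if x%i==0:
--                 contador_divisores+=1
--         if contador_divisores>=máximo_divisores:
--             n_maximo=x
--             máximo_divisores=contador_divisores
--     return n_maximo,máximo_divisores
-- ===== SOURCE B (Python) =====
-- def contar_divisores(n):
--     # Divisor-count sieve, then one linear scan keeping the largest on ties.
--     cnt = [0] * (n + 1)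
--     for i in range(1, n + 1):
--         for j in range(i, n + 1, i):
--             cnt[j] += 1
--     n_maximo, maximo = 0, 0
--     for x in range(1, n + 1):
--         if cnt[x] >= maximo:
--             n_maximo, maximo = x, cnt[x]
--     return n_maximo, maximo
-- ===== Notes on version B (the rewrite author's own statement) =====
-- stated objective: faster
-- what changed: Replaces the O(n^2) per-number trial-division divisor count by a divisor-count sieve (each i marks its multiples) followed by one linear scan that keeps the largest number on ties, exactly like A's >= update.
import Mathlib
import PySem

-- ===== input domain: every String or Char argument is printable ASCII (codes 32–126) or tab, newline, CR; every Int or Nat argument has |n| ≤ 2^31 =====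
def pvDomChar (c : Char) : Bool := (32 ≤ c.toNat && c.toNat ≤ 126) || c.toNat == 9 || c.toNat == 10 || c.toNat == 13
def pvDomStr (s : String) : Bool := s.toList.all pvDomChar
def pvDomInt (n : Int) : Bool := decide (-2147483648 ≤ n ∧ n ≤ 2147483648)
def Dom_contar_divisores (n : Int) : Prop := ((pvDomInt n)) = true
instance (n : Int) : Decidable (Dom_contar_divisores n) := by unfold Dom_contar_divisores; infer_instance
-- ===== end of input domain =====

-- B replaces A's quadratic per-number trial division by a divisor-count sieve plus one linear scan (same tie-breaking: last maximum wins); faster asymptotically.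


-- ===== PORT A =====
-- for x in range(1, n+1): count divisors of x by full trial division; keep (x, count) on count >= best
def contar_divisores (n : Int) : Int × Int :=
  (PySem.List.pyRange 1 (n + 1) 1).foldl
    (fun st x =>
      let c := (PySem.List.pyRange 1 (x + 1) 1).foldl
        (fun c i => if PySem.Int.mod x i == 0 then c + 1 else c) 0
      if c ≥ st.2 then (x, c) else st)
    (0, 0)

-- ===== PORT B =====
-- cnt = [0]*(n+1); for i: for j in range(i, n+1, i): cnt[j] += 1   (all j are in range, so
-- 'cnt[j] += 1' is List.modify and the read 'cnt[x]' is getD — exact on every reached index)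
def pvSieve (n : Int) : List Int :=
  (PySem.List.pyRange 1 (n + 1) 1).foldl
    (fun cnt i =>
      (PySem.List.pyRange i (n + 1) i).foldl (fun c j => c.modify j.toNat (· + 1)) cnt)
    (List.replicate (n + 1).toNat 0)

def contar_divisores_alt (n : Int) : Int × Int :=
  let cnt := pvSieve n
  (PySem.List.pyRange 1 (n + 1) 1).foldl
    (fun st x =>
      let d := cnt.getD x.toNat 0
      if d ≥ st.2 then (x, d) else st)
    (0, 0)

-- ===== PRECONDITION & SPEC =====
def Spec_contar_divisores (n : Int) (out : Int × Int) : Prop := out = contar_divisores_alt n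
instance (n : Int) (out : Int × Int) : Decidable (Spec_contar_divisores n out) := by unfold Spec_contar_divisores; infer_instance

-- ===== CLAIM (what is proved, stated in full; the proofs are below) =====
def Claim_equal_contar_divisores : Prop := ∀ (n : Int), Dom_contar_divisores n → Spec_contar_divisores n (contar_divisores n)

-- ===== LEMMAS AND PROOFS =====

-- the inner fold of the sieve preserves the list's length
theorem pvLen_inner (js : List Int) (c : List Int) :
    (js.foldl (fun c j => c.modify j.toNat (· + 1)) c).length = c.length := by
  induction js generalizing c with
  | nil => rfl
  | cons j js ih => simp [List.foldl_cons, ih, List.length_modify]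

-- effect of one inner sieve pass on one in-range cell
theorem pvInner_getD (js : List Int) (c : List Int) (p : Nat) (hp : p < c.length) :
    (js.foldl (fun c j => c.modify j.toNat (· + 1)) c).getD p 0
      = c.getD p 0 + (js.countP (fun j => j.toNat == p) : Int) := by
  induction js generalizing c with
  | nil => simp
  | cons j js ih =>
    rw [List.foldl_cons, ih _ (by simp [List.length_modify, hp])]
    by_cases h : j.toNat = p
    · have : (c.modify j.toNat (· + 1)).getD p 0 = c.getD p 0 + 1 := by
        simp [List.getD, h, List.getElem?_eq_getElem hp]
      rw [this, List.countP_cons]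
      simp [h]; ring
    · have : (c.modify j.toNat (· + 1)).getD p 0 = c.getD p 0 := by
        simp [List.getD, h, List.getElem?_eq_getElem hp]
      rw [this, List.countP_cons]
      simp [h]
  
-- effect of the whole sieve loop on one in-range cell
theorem pvOuter_getD (n : Int) (is : List Int) (c : List Int) (p : Nat) (hp : p < c.length) :
    (is.foldl (fun c i => (PySem.List.pyRange i (n + 1) i).foldl
        (fun c j => c.modify j.toNat (· + 1)) c) c).getD p 0
      = c.getD p 0 + (is.map (fun i => ((PySem.List.pyRange i (n + 1) i).countP (fun j => j.toNat == p) : Int))).sum := by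
  induction is generalizing c with
  | nil => simp
  | cons i is ih =>
    rw [List.foldl_cons, ih _ (by rw [pvLen_inner]; exact hp),
        pvInner_getD _ _ _ hp, List.map_cons, List.sum_cons]
    ring

-- for 1 ≤ i and 1 ≤ x: the multiples-of-i range hits cell x.toNat once iff i ∣ x ∧ x ≤ n
theorem pvHit (n i x : Int) (hi : 1 ≤ i) (hx : 1 ≤ x) :
    ((PySem.List.pyRange i (n + 1) i).countP (fun j => j.toNat == x.toNat) : Int)
      = if i ∣ x ∧ x ≤ n then 1 else 0 := by
  have hco : (PySem.List.pyRange i (n + 1) i).countP (fun j => j.toNat == x.toNat)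
      = List.count x (PySem.List.pyRange i (n + 1) i) := by
    unfold List.count
    apply List.countP_congr
    intro j hj
    have hj' := (PySem.List.mem_pyRange_iff_of_pos (by omega) j).mp hj
    constructor
    · intro h
      have h1 : j.toNat = x.toNat := by simpa using h
      have h2 : j = x := by omega
      simp [h2]
    · intro h
      have h2 : j = x := by simpa using h
      simp [h2]
  have hmemiff : x ∈ PySem.List.pyRange i (n + 1) i ↔ (i ∣ x ∧ x ≤ n) := by
    rw [PySem.List.mem_pyRange_iff_of_pos (by omega)]
    constructor
    · rintro ⟨h1, h2, h3⟩
      refine ⟨?_, by omega⟩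
      have : (x - i) + i = x := by ring
      exact this ▸ dvd_add h3 dvd_rfl
    · rintro ⟨h1, h2⟩
      exact ⟨Int.le_of_dvd (by omega) h1, by omega, dvd_sub h1 dvd_rfl⟩
  have hnd : (PySem.List.pyRange i (n + 1) i).Nodup := by
    rw [PySem.List.pyRange_of_pos _ _ (by omega)]
    apply List.Nodup.map
    · intro a b hab
      have h1 : i * (a : Int) = i * (b : Int) := by linarith [hab]
      have h2 := mul_left_cancel₀ (show (i : Int) ≠ 0 by omega) h1
      exact_mod_cast h2
    · exact List.nodup_range
  rw [hco]
  by_cases hc : i ∣ x ∧ x ≤ n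
  · rw [List.count_eq_one_of_mem hnd (hmemiff.mpr hc)]
    simp [hc]
  · rw [List.count_eq_zero_of_not_mem (fun hm => hc (hmemiff.mp hm))]
    simp [hc]

-- A's trial-division count of x equals the sieve's cell x, for 1 ≤ x ≤ n
theorem pvCell (n x : Int) (hx1 : 1 ≤ x) (hxn : x ≤ n) :
    (pvSieve n).getD x.toNat 0
      = ((PySem.List.pyRange 1 (x + 1) 1).countP (fun i => decide (i ∣ x)) : Int) := by
  have hp : x.toNat < (List.replicate (n + 1).toNat (0 : Int)).length := by
    simp; omega
  rw [pvSieve, pvOuter_getD n _ _ _ hp]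
  have h0 : (List.replicate (n + 1).toNat (0 : Int)).getD x.toNat 0 = 0 := by
    simp [List.getD]
  rw [h0, zero_add]
  have hmap : (PySem.List.pyRange 1 (n + 1) 1).map
        (fun i => ((PySem.List.pyRange i (n + 1) i).countP (fun j => j.toNat == x.toNat) : Int))
      = (PySem.List.pyRange 1 (n + 1) 1).map
        (fun i => if decide (i ∣ x) then (1 : Int) else 0) := by
    apply List.map_congr_left
    intro i hi
    have hi' := (PySem.List.mem_pyRange_one).mp hi
    rw [pvHit n i x (by omega) hx1]
    by_cases hd : i ∣ x
    · simp [hd, hxn]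
    · simp [hd]
  rw [hmap, PySem.List.sum_map_ite_one_zero]
  have hsplit : PySem.List.pyRange 1 (n + 1) 1
      = PySem.List.pyRange 1 (x + 1) 1 ++ PySem.List.pyRange (x + 1) (n + 1) 1 :=
    PySem.List.pyRange_one_append 1 (x + 1) (n + 1) (by omega) (by omega)
  rw [hsplit, List.countP_append]
  have htail : (PySem.List.pyRange (x + 1) (n + 1) 1).countP (fun i => decide (i ∣ x)) = 0 := by
    rw [List.countP_eq_zero]
    intro i hi
    have hi' := (PySem.List.mem_pyRange_one).mp hi
    simp only [decide_eq_true_eq]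
    intro hd
    have := Int.le_of_dvd (by omega) hd
    omega
  rw [htail]
  simp

-- ===== VERDICT (by name: the statement is the Claim_ definition above) =====
theorem contar_divisores_spec : Claim_equal_contar_divisores := by
  intro n _
  show contar_divisores n = contar_divisores_alt n
  unfold contar_divisores contar_divisores_alt
  apply PySem.List.foldl_congr_mem
  intro acc x hx
  have hx' := (PySem.List.mem_pyRange_one).mp hx
  have hc : (PySem.List.pyRange 1 (x + 1) 1).foldl
      (fun c i => if PySem.Int.mod x i == 0 then c + 1 else c) 0
      = (pvSieve n).getD x.toNat 0 := by
    rw [PySem.List.foldl_count_if, zero_add, pvCell n x (by omega) (by omega)]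
    congr 1
    apply List.countP_congr
    intro i _
    simp [PySem.Int.mod_eq_zero_iff_dvd]
  simp only [hc]
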